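-- pv_equiv track=rewrite | github.com/stenknutsen/HomeGrownPOSTagger | PhaseThreeTagging.py | N_ing_PRPS_VerbTagger
-- ===== SOURCE A (Python) =====
-- def N_ing_PRPS_VerbTagger(sent):
--     sentToReturn = []
--     skip = 0
--
--     for i in range(len(sent)):
--
--         if skip>0:
--             skip = skip -1
--             continue
--
--         if (i)<0 | (i+2)>=len(sent):
--             sentToReturn += [sent[i]]
--             continue
--
--         leftContext = sent[i]
--         target = sent[i+1]
--         rightContext = sent[i+2]
--
--         if (leftContext[1].startswith("N"))&(rightContext[1]=="PRP$")&(target[1]=="UNK")&(target[0].endswith("ing")):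
--
--             sentToReturn += [leftContext]
--             sentToReturn += [(target[0],"VBG")]
--             sentToReturn += [rightContext]
--             skip = 2
--
--         else:
--             sentToReturn += [leftContext]
--
--     return sentToReturn
-- ===== SOURCE B (Python) =====
-- def N_ing_PRPS_VerbTagger(sent):
--     n = len(sent)
--     retag = {i + 1
--              for i in range(max(n - 2, 0))
--              if sent[i][1].startswith("N")
--              and sent[i + 2][1] == "PRP$"
--              and sent[i + 1][1] == "UNK"
--              and sent[i + 1][0].endswith("ing")}
--     return [(sent[j][0], "VBG") if j in retag else sent[j] for j in range(n)]
-- ===== Notes on version B (the rewrite author's own statement) =====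
-- stated objective: simpler
-- what changed: Replaces A's single-pass skip-counter state machine (which re-emits the three matched tokens and suppresses the next two iterations) with a two-phase decomposition: first compute the set of positions to retag with a set comprehension, then rebuild the sentence positionally with a list comprehension; correctness relies on matches never overlapping.
import Mathlib
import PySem

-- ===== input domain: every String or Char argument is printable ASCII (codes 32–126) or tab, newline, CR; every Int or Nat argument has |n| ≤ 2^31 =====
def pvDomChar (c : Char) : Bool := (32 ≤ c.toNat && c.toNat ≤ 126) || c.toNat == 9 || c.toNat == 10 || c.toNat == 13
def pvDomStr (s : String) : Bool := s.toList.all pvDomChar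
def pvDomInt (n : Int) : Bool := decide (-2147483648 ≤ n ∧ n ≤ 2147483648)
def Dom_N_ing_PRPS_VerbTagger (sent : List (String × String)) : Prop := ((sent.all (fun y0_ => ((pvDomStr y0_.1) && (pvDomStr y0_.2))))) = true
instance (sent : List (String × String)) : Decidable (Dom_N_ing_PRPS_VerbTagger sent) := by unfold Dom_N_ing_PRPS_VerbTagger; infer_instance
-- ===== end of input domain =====

-- B replaces A's skip-counter state machine by a precomputed set of retag positions plus a
-- positional rebuild (objective: simpler decomposition; same exact output).


-- indexing sent[i]: every access in both programs is in range, so getD's default is never used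
def pvAt (sent : List (String × String)) (i : Nat) : String × String := sent.getD i ("", "")

-- the shared 4-conjunct condition, written in both Pythons in this exact order
def pvCond (sent : List (String × String)) (i : Nat) : Bool :=
  PySem.Str.startswith (pvAt sent i).2 "N" &&
  ((pvAt sent (i + 2)).2 == "PRP$") &&
  ((pvAt sent (i + 1)).2 == "UNK") &&
  PySem.Str.endswith (pvAt sent (i + 1)).1 "ing"

-- ===== PORT A =====
-- A's loop over range(len(sent)) with accumulator sentToReturn and skip counter.
-- Python's '(i)<0 | (i+2)>=len(sent)' is the chained comparison i < (0|(i+2)) >= len(sent),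
-- i.e. (i < i+2) and (i+2 >= len(sent)), which is exactly i+2 >= len(sent).
def pvALoop (sent : List (String × String)) :
    List Nat → List (String × String) → Nat → List (String × String)
  | [], acc, _ => acc
  | i :: rest, acc, skip =>
    if skip > 0 then pvALoop sent rest acc (skip - 1)
    else if i + 2 ≥ sent.length then pvALoop sent rest (acc ++ [pvAt sent i]) skip
    else if pvCond sent i then
      pvALoop sent rest
        (acc ++ [pvAt sent i] ++ [((pvAt sent (i + 1)).1, "VBG")] ++ [pvAt sent (i + 2)]) 2
    else pvALoop sent rest (acc ++ [pvAt sent i]) skip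

def N_ing_PRPS_VerbTagger (sent : List (String × String)) : List (String × String) :=
  pvALoop sent (List.range sent.length) [] 0

-- ===== PORT B =====
-- the set comprehension {i+1 for i in range(max(n-2,0)) if <cond>}
def pvRetag (sent : List (String × String)) : PySem.Set Nat :=
  PySem.Set.ofList
    (((List.range (sent.length - 2)).filter (fun i => pvCond sent i)).map (· + 1))

-- the comprehension body: (sent[j][0],"VBG") if j in retag else sent[j]
def pvF (sent : List (String × String)) (j : Nat) : String × String :=
  if PySem.Set.contains (pvRetag sent) j then ((pvAt sent j).1, "VBG") else pvAt sent j

def N_ing_PRPS_VerbTagger_alt (sent : List (String × String)) : List (String × String) :=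
  (List.range sent.length).map (pvF sent)

-- ===== PRECONDITION & SPEC =====
def Spec_N_ing_PRPS_VerbTagger (sent : List (String × String)) (out : List (String × String)) : Prop := out = N_ing_PRPS_VerbTagger_alt sent
instance (sent : List (String × String)) (out : List (String × String)) : Decidable (Spec_N_ing_PRPS_VerbTagger sent out) := by unfold Spec_N_ing_PRPS_VerbTagger; infer_instance

-- ===== CLAIM (what is proved, stated in full; the proofs are below) =====
def Claim_equal_N_ing_PRPS_VerbTagger : Prop := ∀ (sent : List (String × String)), Dom_N_ing_PRPS_VerbTagger sent → Spec_N_ing_PRPS_VerbTagger sent (N_ing_PRPS_VerbTagger sent)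

-- ===== LEMMAS AND PROOFS =====

lemma pvRetag_mem (sent : List (String × String)) (j : Nat) :
    j ∈ pvRetag sent ↔ ∃ i, i + 1 = j ∧ i < sent.length - 2 ∧ pvCond sent i = true := by
  simp [pvRetag, PySem.Set.mem_ofList, List.mem_map, List.mem_filter, List.mem_range]
  constructor
  · rintro ⟨i, ⟨hi, hc⟩, hj⟩; exact ⟨i, hj, hi, hc⟩
  · rintro ⟨i, hj, hi, hc⟩; exact ⟨i, ⟨hi, hc⟩, hj⟩

lemma pvRetag_not_mem_of_cond_false (sent : List (String × String)) (i : Nat)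
    (h : pvCond sent i = false) : (i + 1) ∉ pvRetag sent := by
  intro hmem
  rcases (pvRetag_mem sent (i + 1)).1 hmem with ⟨i', hi', _, hc⟩
  have : i' = i := by omega
  subst this; simp [h] at hc

lemma pv_sw_UNK : PySem.Str.startswith "UNK" "N" = false := by decide

lemma pv_sw_PRP : PySem.Str.startswith "PRP$" "N" = false := by decide

lemma pvCond_succ_false (sent : List (String × String)) (i : Nat)
    (h : pvCond sent i = true) : pvCond sent (i + 1) = false := by
  have hU : (pvAt sent (i + 1)).2 = "UNK" := by
    simp only [pvCond, Bool.and_eq_true] at h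
    simpa using h.1.2
  simp only [pvCond, hU, pv_sw_UNK, Bool.false_and]

lemma pvCond_succ2_false (sent : List (String × String)) (i : Nat)
    (h : pvCond sent i = true) : pvCond sent (i + 2) = false := by
  have hP : (pvAt sent (i + 2)).2 = "PRP$" := by
    simp only [pvCond, Bool.and_eq_true] at h
    simpa using h.1.1.2
  simp only [pvCond, hP, pv_sw_PRP, Bool.false_and]

lemma pvKey (sent : List (String × String)) :
    ∀ k i acc, i + k = sent.length →
      i ∉ pvRetag sent →
      pvALoop sent (List.range' i k) acc 0 = acc ++ (List.range' i k).map (pvF sent) := by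
  intro k
  induction k using Nat.strong_induction_on with
  | _ k IH =>
    intro i acc hlen hni
    match k with
    | 0 => simp [pvALoop]
    | k + 1 =>
      rw [List.range'_succ]
      by_cases hb : i + 2 ≥ sent.length
      · -- boundary branch: append sent[i]
        rw [pvALoop]
        simp only [if_neg (by omega : ¬ (0:Nat) > 0), if_pos hb]
        have hni' : (i + 1) ∉ pvRetag sent := by
          intro hm
          rcases (pvRetag_mem sent (i + 1)).1 hm with ⟨i', hi', hlt, _⟩
          omega
        rw [IH k (by omega) (i + 1) _ (by omega) hni']
        simp [pvF, hni]
      · push Not at hb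
        by_cases hc : pvCond sent i = true
        · -- match: consume i, i+1, i+2
          have hk3 : 3 ≤ k + 1 := by omega
          match k, hk3 with
          | k + 2, _ =>
            rw [List.range'_succ, List.range'_succ]
            rw [pvALoop]
            simp only [if_neg (by omega : ¬ (0:Nat) > 0),
              if_neg (by omega : ¬ i + 2 ≥ sent.length), if_pos hc]
            rw [pvALoop]
            simp only [if_pos (by omega : (2:Nat) > 0)]
            rw [pvALoop]
            simp only [if_pos (by omega : (1:Nat) > 0)]
            have h1 : (i + 1) ∈ pvRetag sent :=
              (pvRetag_mem sent (i + 1)).2 ⟨i, rfl, by omega, hc⟩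
            have h2 : (i + 2) ∉ pvRetag sent :=
              pvRetag_not_mem_of_cond_false sent (i + 1) (pvCond_succ_false sent i hc)
            have h3 : (i + 3) ∉ pvRetag sent := by
              have := pvRetag_not_mem_of_cond_false sent (i + 2) (pvCond_succ2_false sent i hc)
              simpa [Nat.add_assoc] using this
            rw [IH k (by omega) (i + 3) _ (by omega) h3]
            simp [pvF, hni, h1, h2, Nat.add_assoc]
        · -- no match: append sent[i]
          rw [pvALoop]
          simp only [if_neg (by omega : ¬ (0:Nat) > 0),
            if_neg (by omega : ¬ i + 2 ≥ sent.length)]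
          rw [if_neg hc]
          have hc' : pvCond sent i = false := by simpa using hc
          rw [IH k (by omega) (i + 1) _ (by omega) (pvRetag_not_mem_of_cond_false sent i hc')]
          simp [pvF, hni]

-- ===== VERDICT (by name: the statement is the Claim_ definition above) =====
theorem N_ing_PRPS_VerbTagger_spec : Claim_equal_N_ing_PRPS_VerbTagger := by
  intro sent _
  show N_ing_PRPS_VerbTagger sent = N_ing_PRPS_VerbTagger_alt sent
  have h0 : 0 ∉ pvRetag sent := by
    intro hm
    rcases (pvRetag_mem sent 0).1 hm with ⟨i, hi, _, _⟩; omega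
  have := pvKey sent sent.length 0 [] (by omega) h0
  simpa [N_ing_PRPS_VerbTagger, N_ing_PRPS_VerbTagger_alt, List.range_eq_range'] using this
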